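-- pv_equiv track=rewrite | github.com/harzav/TR_PPI_project | codes/insybio-biomarkers/03.Biomarkers_Dataset_Statistical_Analysis/statistical_data_analysis_multiple_conditions_v3_2.py | data_per_timepoints
-- ===== SOURCE A (Python) =====
-- def data_per_timepoints(data, timepoints):
-- 	'''
-- 	Calculates the data per timepoints.
--
-- 	Args:
-- 		data: input data
-- 		timepoints: the number of timepoints
--
-- 	Returns: a list with the splitted data.
-- 	'''
-- 	splitted_data=list()
-- 	for i in range(timepoints):
-- 		temp_table=[]
-- 		for j in range(len(data)):
-- 			if j%timepoints==i:
-- 				temp_table.append(data[j])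
-- 		splitted_data.append(temp_table)
-- 	return splitted_data
-- ===== SOURCE B (Python) =====
-- def data_per_timepoints(data, timepoints):
--     if timepoints <= 0:
--         return []
--     buckets = [[] for _ in range(timepoints)]
--     for j, x in enumerate(data):
--         buckets[j % timepoints].append(x)
--     return buckets
-- ===== Notes on version B (the rewrite author's own statement) =====
-- stated objective: faster
-- what changed: Replaces the timepoints-many full scans of data (one per residue class) with a single pass that appends data[j] to bucket j % timepoints.
import Mathlib
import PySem

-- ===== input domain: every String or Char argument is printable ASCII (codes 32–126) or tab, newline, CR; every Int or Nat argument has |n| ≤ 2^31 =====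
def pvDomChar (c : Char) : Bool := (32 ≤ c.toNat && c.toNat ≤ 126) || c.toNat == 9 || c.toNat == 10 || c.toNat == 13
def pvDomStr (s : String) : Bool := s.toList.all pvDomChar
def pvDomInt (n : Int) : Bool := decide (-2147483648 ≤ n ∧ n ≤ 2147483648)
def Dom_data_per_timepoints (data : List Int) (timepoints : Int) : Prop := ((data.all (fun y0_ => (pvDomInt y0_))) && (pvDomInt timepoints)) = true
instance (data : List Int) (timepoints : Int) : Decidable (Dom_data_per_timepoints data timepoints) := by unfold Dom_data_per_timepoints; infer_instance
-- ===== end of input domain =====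

-- B replaces A's timepoints-many scans of data with a single pass that appends
-- data[j] to bucket j % timepoints (objective: faster, asymptotic).


-- ===== PORT A =====
-- A: for each i in range(timepoints), scan all of data and collect data[j] with j % timepoints == i.
def data_per_timepoints (data : List Int) (timepoints : Int) : List (List Int) :=
  (PySem.List.pyRange 0 timepoints 1).foldl
    (fun splitted i =>
      splitted ++ [(PySem.List.pyRange 0 (data.length : Int) 1).foldl
        (fun temp j =>
          if PySem.Int.mod j timepoints = i then temp ++ [PySem.List.pyGetD data j 0] else temp) []])
    []

-- ===== PORT B =====
-- B: one pass over enumerate(data), appending x to bucket j % timepoints.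
def data_per_timepoints_alt (data : List Int) (timepoints : Int) : List (List Int) :=
  if timepoints ≤ 0 then []
  else
    (PySem.List.enumerate data 0).foldl
      (fun bs jx => bs.modify (PySem.Int.mod jx.1 timepoints).toNat (fun b => b ++ [jx.2]))
      (List.replicate timepoints.toNat [])

-- ===== PRECONDITION & SPEC =====
def Spec_data_per_timepoints (data : List Int) (timepoints : Int) (out : List (List Int)) : Prop := out = data_per_timepoints_alt data timepoints
instance (data : List Int) (timepoints : Int) (out : List (List Int)) : Decidable (Spec_data_per_timepoints data timepoints out) := by unfold Spec_data_per_timepoints; infer_instance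

-- ===== CLAIM (what is proved, stated in full; the proofs are below) =====
def Claim_equal_data_per_timepoints : Prop := ∀ (data : List Int) (timepoints : Int), Dom_data_per_timepoints data timepoints → Spec_data_per_timepoints data timepoints (data_per_timepoints data timepoints)

-- ===== LEMMAS AND PROOFS =====

-- the i-th residue-class bucket, stated over the index range of data
def pvBucket (data : List Int) (t i : Int) : List Int :=
  ((PySem.List.pyRange 0 (data.length : Int) 1).filter
    (fun j => decide (PySem.Int.mod j t = i))).map (fun j => PySem.List.pyGetD data j 0)

lemma A_inner (data : List Int) (t i : Int) :
    (PySem.List.pyRange 0 (data.length : Int) 1).foldl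
      (fun temp j =>
        if PySem.Int.mod j t = i then temp ++ [PySem.List.pyGetD data j 0] else temp) []
    = pvBucket data t i := by
  have h := PySem.List.foldl_append_if (p := fun j => decide (PySem.Int.mod j t = i))
    (f := fun j => PySem.List.pyGetD data j 0)
    (l := PySem.List.pyRange 0 (data.length : Int) 1) (acc := [])
  simpa [pvBucket] using h

lemma A_eq_map (data : List Int) (t : Int) :
    data_per_timepoints data t
    = (PySem.List.pyRange 0 t 1).map (fun i => pvBucket data t i) := by
  unfold data_per_timepoints
  rw [PySem.List.foldl_append_singleton_eq_map
    (f := fun i => (PySem.List.pyRange 0 (data.length : Int) 1).foldl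
      (fun temp j =>
        if PySem.Int.mod j t = i then temp ++ [PySem.List.pyGetD data j 0] else temp) [])]
  simp only [List.nil_append]
  exact List.map_congr_left (fun i _ => A_inner data t i)

lemma enum_append_singleton (xs : List Int) (x : Int) (s : Int) :
    PySem.List.enumerate (xs ++ [x]) s
    = PySem.List.enumerate xs s ++ [(s + (xs.length : Int), x)] := by
  induction xs generalizing s with
  | nil => simp [PySem.List.enumerate_cons, PySem.List.enumerate_nil]
  | cons y ys ih =>
      simp only [List.cons_append, PySem.List.enumerate_cons, ih, List.length_cons]
      have h : s + 1 + (ys.length : Int) = s + ((ys.length + 1 : Nat) : Int) := by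
        push_cast; ring
      rw [h]

lemma bucket_append (data : List Int) (x : Int) (t i : Int) :
    pvBucket (data ++ [x]) t i
    = pvBucket data t i
      ++ (if PySem.Int.mod (data.length : Int) t = i then [x] else []) := by
  unfold pvBucket
  have hlen : ((data ++ [x]).length : Int) = (data.length : Int) + 1 := by
    simp
  rw [hlen, PySem.List.pyRange_one_succ_right (by positivity), List.filter_append,
    List.map_append]
  congr 1
  · apply List.map_congr_left
    intro j hj
    have hj' : j ∈ PySem.List.pyRange 0 (data.length : Int) 1 := List.mem_of_mem_filter hj
    have hb := PySem.List.mem_pyRange_one.mp hj'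
    have hjn : j = ((j.toNat : Nat) : Int) := by omega
    rw [hjn, PySem.List.pyGetD_natCast, PySem.List.pyGetD_natCast]
    exact List.getD_append _ _ _ _ (by omega)
  · by_cases h : PySem.Int.mod (data.length : Int) t = i
    · simp only [List.filter_cons, List.filter_nil, h, decide_true, if_pos, List.map_cons,
        List.map_nil]
      congr 1
      rw [show ((data.length : Nat) : Int) = ((data.length : Nat) : Int) from rfl,
        PySem.List.pyGetD_natCast]
      rw [List.getD_append_right _ _ _ _ (le_refl _)]
      simp
    · simp [h]

lemma modify_map_range (t : Int) (ht : 0 < t) (L : Int) (x : Int)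
    (g : Int → List Int) :
    ((PySem.List.pyRange 0 t 1).map g).modify (PySem.Int.mod L t).toNat (fun b => b ++ [x])
    = (PySem.List.pyRange 0 t 1).map
        (fun i => g i ++ (if PySem.Int.mod L t = i then [x] else [])) := by
  have hnn : 0 ≤ PySem.Int.mod L t := PySem.Int.mod_nonneg L ht
  apply List.ext_getElem
  · simp [List.length_modify]
  · intro n h1 h2
    have hn : n < (PySem.List.pyRange 0 t 1).length := by
      simpa [List.length_modify] using h1
    rw [List.getElem_modify]
    simp only [List.getElem_map]
    rw [PySem.List.getElem_pyRange_one]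
    split_ifs with hk hm hm
    · simp
    · exfalso; omega
    · exfalso; omega
    · simp

lemma B_eq_map (data : List Int) (t : Int) (ht : 0 < t) :
    data_per_timepoints_alt data t
    = (PySem.List.pyRange 0 t 1).map (fun i => pvBucket data t i) := by
  unfold data_per_timepoints_alt
  rw [if_neg (by omega)]
  induction data using List.reverseRecOn with
  | nil =>
      simp only [PySem.List.enumerate_nil, List.foldl_nil]
      have : pvBucket [] t = fun _ => ([] : List Int) := by
        funext i
        simp [pvBucket, PySem.List.pyRange_one_eq_nil (le_refl 0)]
      rw [this]
      rw [List.map_const']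
      congr 1
      simp [PySem.List.length_pyRange_one]
  | append_singleton ys x ih =>
      rw [enum_append_singleton, List.foldl_append, List.foldl_cons, List.foldl_nil, ih]
      simp only [zero_add]
      rw [modify_map_range t ht]
      exact List.map_congr_left (fun i _ => (bucket_append ys x t i).symm)

-- ===== VERDICT (by name: the statement is the Claim_ definition above) =====
theorem data_per_timepoints_spec : Claim_equal_data_per_timepoints := by
  intro data t _
  unfold Spec_data_per_timepoints
  by_cases ht : t ≤ 0
  · unfold data_per_timepoints data_per_timepoints_alt
    rw [PySem.List.pyRange_one_eq_nil ht, if_pos ht]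
    rfl
  · rw [A_eq_map, B_eq_map data t (by omega)]
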